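-- pv_equiv track=rewrite | github.com/every-algorithm/python | operating-system/elevator_algorithm.py | elevator_disk_scheduling
-- ===== SOURCE A (Python) =====
-- def elevator_disk_scheduling(requests, current_pos, direction):
--     sequence = []
--     remaining = sorted(requests)
--     pos = current_pos
--     dir = direction
--
--     while remaining:
--         # Find next request in current direction
--         if dir == 1:
--             candidates = [r for r in remaining if r >= pos]
--         else:
--             candidates = [r for r in remaining if r <= pos]
--
--         if not candidates:
--             dir *= -1
--             continue
--
--         next_req = min(candidates) if dir == 1 else max(candidates)
--         sequence.append(next_req)
--         pos = next_req
--         remaining.remove(next_req)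
--
--     return sequence
-- ===== SOURCE B (Python) =====
-- def elevator_disk_scheduling(requests, current_pos, direction):
--     s = sorted(requests)
--     if direction == 1:
--         up = [r for r in s if r >= current_pos]
--         down = [r for r in s if r < current_pos]
--         return up + down[::-1]
--     else:
--         down = [r for r in s if r <= current_pos]
--         up = [r for r in s if r > current_pos]
--         return down[::-1] + up
-- ===== Notes on version B (the rewrite author's own statement) =====
-- stated objective: alternative
-- what changed: Replaced A's while-loop that repeatedly filters the remaining requests and extracts min/max with remove by one sort plus two linear partitions and a reversed-slice concatenation.
import Mathlib
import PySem

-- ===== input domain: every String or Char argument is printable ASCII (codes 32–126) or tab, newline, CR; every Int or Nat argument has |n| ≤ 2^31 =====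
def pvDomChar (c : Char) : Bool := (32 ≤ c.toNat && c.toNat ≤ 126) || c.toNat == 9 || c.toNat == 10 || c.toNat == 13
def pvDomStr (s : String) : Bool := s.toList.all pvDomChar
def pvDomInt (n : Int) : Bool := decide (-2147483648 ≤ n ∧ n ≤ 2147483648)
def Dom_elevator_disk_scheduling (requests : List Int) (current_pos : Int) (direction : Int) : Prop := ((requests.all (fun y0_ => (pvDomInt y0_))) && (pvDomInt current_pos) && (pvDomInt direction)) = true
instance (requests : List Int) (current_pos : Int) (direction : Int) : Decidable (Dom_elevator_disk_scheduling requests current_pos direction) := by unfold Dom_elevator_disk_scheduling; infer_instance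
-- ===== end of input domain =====

-- B replaces A's repeated filter + min/max + remove loop by one sort and two linear
-- partitions of the sorted list (alternative decomposition; return value proved equal).

-- ===== PORT A =====
-- A's while-loop as fuel recursion: each iteration either serves one request or flips
-- direction, and inside Pre_ two consecutive flips never happen, so fuel 2*len+3 covers
-- every terminating run; min?/max? are applied to nonempty candidates and remove? to a
-- present member, so the .getD defaults are never taken.
def elevStep : Nat → List Int → Int → Int → List Int
  | 0, _, _, _ => []
  | fuel+1, remaining, pos, dir =>
    if remaining = [] then []
    else
      let candidates := if dir = 1 then remaining.filter (fun r => pos ≤ r)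
                        else remaining.filter (fun r => r ≤ pos)
      if candidates = [] then elevStep fuel remaining pos (dir * -1)
      else
        let next_req := if dir = 1 then (PySem.List.min? candidates (fun x => x)).getD 0
                        else (PySem.List.max? candidates (fun x => x)).getD 0
        next_req :: elevStep fuel ((PySem.List.remove? remaining next_req).getD remaining) next_req dir

def elevator_disk_scheduling (requests : List Int) (current_pos : Int) (direction : Int) : List Int :=
  let remaining := PySem.List.sorted requests (fun x => x)
  elevStep (2 * remaining.length + 3) remaining current_pos direction
-- ===== PORT B =====
-- Source B's comprehensions are the filters; down[::-1] is .reverse.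
def elevator_disk_scheduling_alt (requests : List Int) (current_pos : Int) (direction : Int) : List Int :=
  let s := PySem.List.sorted requests (fun x => x)
  if direction = 1 then
    let up := s.filter (fun r => decide (current_pos ≤ r))
    let down := s.filter (fun r => decide (r < current_pos))
    up ++ down.reverse
  else
    let down := s.filter (fun r => decide (r ≤ current_pos))
    let up := s.filter (fun r => decide (current_pos < r))
    down.reverse ++ up

-- ===== PRECONDITION & SPEC =====
-- Pre_ excludes exactly the inputs on which A never returns: when direction is neither
-- 1 nor -1, A's `dir *= -1` can never make `dir == 1`, so if some request exceeds
-- current_pos the while-loop spins forever; for such directions A does terminate when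
-- every request is ≤ current_pos, and those inputs are kept inside Pre_.
def Pre_elevator_disk_scheduling (requests : List Int) (current_pos : Int) (direction : Int) : Prop :=
  direction = 1 ∨ direction = -1 ∨ ∀ r ∈ requests, r ≤ current_pos
instance (requests : List Int) (current_pos : Int) (direction : Int) : Decidable (Pre_elevator_disk_scheduling requests current_pos direction) := by unfold Pre_elevator_disk_scheduling; infer_instance

def pvWitness_elevator_disk_scheduling : List Int × Int × Int := ([3, 9, 1, 7], 5, 1)

def Spec_elevator_disk_scheduling (requests : List Int) (current_pos : Int) (direction : Int) (out : List Int) : Prop := out = elevator_disk_scheduling_alt requests current_pos direction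
instance (requests : List Int) (current_pos : Int) (direction : Int) (out : List Int) : Decidable (Spec_elevator_disk_scheduling requests current_pos direction out) := by unfold Spec_elevator_disk_scheduling; infer_instance

-- ===== CLAIM (what is proved, stated in full; the proofs are below) =====
def Claim_equal_elevator_disk_scheduling : Prop := ∀ (requests : List Int) (current_pos : Int) (direction : Int), Dom_elevator_disk_scheduling requests current_pos direction → Pre_elevator_disk_scheduling requests current_pos direction → Spec_elevator_disk_scheduling requests current_pos direction (elevator_disk_scheduling requests current_pos direction)

-- ===== LEMMAS AND PROOFS =====

lemma pv_min_head (a : Int) (t : List Int) (h : ∀ y ∈ t, a ≤ y) :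
    (PySem.List.min? (a :: t) (fun x => x)).getD 0 = a := by
  rcases hm : PySem.List.min? (a :: t) (fun x => x) with _ | m
  · rw [PySem.List.min?_eq_none_iff] at hm; simp at hm
  · have h1 := PySem.List.min?_isMin hm a (by simp)
    have h2 : m ∈ a :: t := PySem.List.min?_mem hm
    simp only [Option.getD_some]
    rcases List.mem_cons.mp h2 with h3 | h3
    · exact h3
    · exact le_antisymm h1 (h m h3)

lemma pv_max_val (c : List Int) (b : Int) (hb : b ∈ c) (h : ∀ y ∈ c, y ≤ b) :
    (PySem.List.max? c (fun x => x)).getD 0 = b := by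
  rcases hm : PySem.List.max? c (fun x => x) with _ | m
  · rw [PySem.List.max?_eq_none_iff] at hm; subst hm; simp at hb
  · have h1 := PySem.List.max?_isMax hm b hb
    have h2 := h m (PySem.List.max?_mem hm)
    simpa using le_antisymm h2 h1

lemma pv_rep (ds : List Int) (b : Int) (h : ∀ y ∈ ds, y = b) : ds ++ [b] = b :: ds := by
  induction ds with
  | nil => rfl
  | cons a t ih =>
    have ha := h a (by simp)
    have ht := ih (fun y hy => h y (by simp [hy]))
    rw [List.cons_append, ht, ha]

lemma pv_erase_max (ds : List Int) (e : List Int) (b : Int)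
    (hs : ds.Pairwise (· ≤ ·)) (h : ∀ y ∈ ds, y ≤ b) :
    (ds ++ b :: e).erase b = ds ++ e := by
  induction ds with
  | nil => simp
  | cons a t ih =>
    rcases List.pairwise_cons.mp hs with ⟨ha, ht⟩
    by_cases hab : a = b
    · have hall : ∀ y ∈ t, y = b := fun y hy => le_antisymm (h y (by simp [hy])) (hab ▸ ha y hy)
      have h1 : (a :: (t ++ b :: e)).erase b = t ++ b :: e := by
        rw [hab, List.erase_cons_head]
      have h2 : t ++ b :: e = (a :: t) ++ e := by
        have := pv_rep t b hall
        rw [List.cons_append, hab, show t ++ b :: e = (t ++ [b]) ++ e by simp, this]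
        simp
      rw [List.cons_append, h1, h2]
    · rw [List.cons_append, List.erase_cons_tail (by simp [hab]), ih ht (fun y hy => h y (by simp [hy]))]
      simp

lemma pv_down_only (fuel : Nat) (d : List Int) (pos dir : Int)
    (hs : d.Pairwise (· ≤ ·)) (hle : ∀ x ∈ d, x ≤ pos) (hdir : dir ≠ 1)
    (hfuel : d.length < fuel) :
    elevStep fuel d pos dir = d.reverse := by
  induction d using List.reverseRecOn generalizing fuel pos with
  | nil =>
    cases fuel with
    | zero => omega
    | succ f => simp [elevStep]
  | append_singleton ds b ih =>
    cases fuel with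
    | zero => omega
    | succ f =>
      have hne : ds ++ [b] ≠ [] := by simp
      have hdsb : ∀ y ∈ ds, y ≤ b := by
        intro y hy
        have := List.pairwise_append.mp hs
        exact this.2.2 y hy b (by simp)
      have hall : ∀ y ∈ ds ++ [b], y ≤ pos := hle
      have hcand : (ds ++ [b]).filter (fun r => decide (r ≤ pos)) = ds ++ [b] := by
        rw [List.filter_eq_self]
        intro y hy; simpa using hle y hy
      have hmax : (PySem.List.max? (ds ++ [b]) (fun x => x)).getD 0 = b :=
        pv_max_val _ b (by simp) (by intro y hy; simp at hy; rcases hy with h'|h'; exacts [hdsb y h', le_of_eq h'])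
      have hrem : (PySem.List.remove? (ds ++ [b]) b).getD (ds ++ [b]) = ds := by
        rw [PySem.List.remove?_eq_some_erase (ds ++ [b]) b (by simp)]
        simpa using pv_erase_max ds [] b (List.pairwise_append.mp hs).1 hdsb
      simp only [elevStep, if_neg hdir, hcand, if_neg hne]
      simp only [hmax, hrem]
      rw [ih f b (List.pairwise_append.mp hs).1 (fun x hx => hdsb x hx) (by simp at hfuel; omega)]
      simp

lemma pv_up (v : List Int) (fuel : Nat) (u : List Int) (pos : Int)
    (hs : (u ++ v).Pairwise (· ≤ ·))
    (hu : ∀ x ∈ u, x < pos) (hv : ∀ x ∈ v, pos ≤ x)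
    (hfuel : (u ++ v).length + 2 ≤ fuel) :
    elevStep fuel (u ++ v) pos 1 = v ++ u.reverse := by
  induction v generalizing fuel u pos with
  | nil =>
    cases fuel with
    | zero => omega
    | succ f =>
      rcases List.eq_nil_or_concat u with hu0 | ⟨_, _, _⟩
      · subst hu0; simp [elevStep]
      · have hneu : u ++ [] ≠ [] := by simp_all
        have hcand : (u ++ ([]:List Int)).filter (fun r => decide (pos ≤ r)) = [] := by
          rw [List.filter_eq_nil_iff]; intro y hy
          simp at hy ⊢; exact hu y hy
        simp only [elevStep, if_neg hneu, if_true, hcand]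

        rw [pv_down_only f (u ++ []) pos (1 * -1) (by simpa using hs) (by intro x hx; simp at hx; exact le_of_lt (hu x hx)) (by norm_num) (by simp at hfuel ⊢; omega)]
        simp
  | cons a v' ih =>
    cases fuel with
    | zero => omega
    | succ f =>
      have hne : u ++ a :: v' ≠ [] := by simp
      have hp := List.pairwise_append.mp hs
      have hav' : ∀ y ∈ v', a ≤ y := fun y hy => (List.pairwise_cons.mp hp.2.1).1 y hy
      have hcand : (u ++ a :: v').filter (fun r => decide (pos ≤ r)) = a :: v' := by
        rw [List.filter_append, List.filter_eq_nil_iff.mpr (by intro y hy; simp; exact hu y hy), List.filter_eq_self.mpr (by intro y hy; simp; exact hv y hy)]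
        simp
      have hmin : (PySem.List.min? (a :: v') (fun x => x)).getD 0 = a := pv_min_head a v' hav'
      have hanu : a ∉ u := fun hmem => absurd (hv a (by simp)) (not_le.mpr (hu a hmem))
      have hrem : (PySem.List.remove? (u ++ a :: v') a).getD (u ++ a :: v') = u ++ v' := by
        rw [PySem.List.remove?_eq_some_erase (u ++ a :: v') a (by simp)]
        simp [List.erase_append_right _ hanu]
      simp only [elevStep, if_neg hne, if_true, hcand, if_neg (show ¬(a :: v' = []) by simp), hmin, hrem]
      have hrec := ih f u a (hs.sublist (by simp)) (fun x hx => lt_of_lt_of_le (hu x hx) (hv a (by simp))) hav' (by simp at hfuel ⊢; omega)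
      simp [hrec]

lemma pv_down (d : List Int) (fuel : Nat) (e : List Int) (pos : Int)
    (hs : (d ++ e).Pairwise (· ≤ ·))
    (hd : ∀ x ∈ d, x ≤ pos) (he : ∀ x ∈ e, pos < x)
    (hfuel : (d ++ e).length + 3 ≤ fuel) :
    elevStep fuel (d ++ e) pos (-1) = d.reverse ++ e := by
  induction d using List.reverseRecOn generalizing fuel pos with
  | nil =>
    cases fuel with
    | zero => omega
    | succ f =>
      rcases List.eq_nil_or_concat e with he0 | ⟨_, _, _⟩
      · subst he0; simp [elevStep]
      · have hnee : ([] : List Int) ++ e ≠ [] := by simp_all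
        have hcand : (([] : List Int) ++ e).filter (fun r => decide (r ≤ pos)) = [] := by
          rw [List.filter_eq_nil_iff]; intro y hy
          simp at hy ⊢; exact he y hy
        simp only [elevStep, if_neg hnee, if_neg (show ¬((-1 : Int) = 1) by norm_num), hcand]
        rw [show ((-1 : Int) * -1) = 1 by norm_num]
        rw [pv_up e f [] pos (by simpa using hs) (by simp) (fun x hx => le_of_lt (he x hx)) (by simp at hfuel ⊢; omega)]
        simp
  | append_singleton ds b ih =>
    cases fuel with
    | zero => omega
    | succ f =>
      have hne : (ds ++ [b]) ++ e ≠ [] := by simp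
      have hpw := List.pairwise_append.mp hs
      have hsd : (ds ++ [b]).Pairwise (· ≤ ·) := hpw.1
      have hdsb : ∀ y ∈ ds, y ≤ b := by
        intro y hy
        exact (List.pairwise_append.mp hsd).2.2 y hy b (by simp)
      have hbpos : b ≤ pos := hd b (by simp)
      have hcand : ((ds ++ [b]) ++ e).filter (fun r => decide (r ≤ pos)) = ds ++ [b] := by
        rw [List.filter_append, List.filter_eq_self.mpr (by intro y hy; simp; exact hd y hy),
            List.filter_eq_nil_iff.mpr (by intro y hy; simp; exact he y hy)]
        simp
      have hmax : (PySem.List.max? (ds ++ [b]) (fun x => x)).getD 0 = b :=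
        pv_max_val _ b (by simp) (by intro y hy; simp at hy; rcases hy with h'|h'; exacts [hdsb y h', le_of_eq h'])
      have hrem : (PySem.List.remove? ((ds ++ [b]) ++ e) b).getD ((ds ++ [b]) ++ e) = ds ++ e := by
        rw [PySem.List.remove?_eq_some_erase ((ds ++ [b]) ++ e) b (by simp)]
        have : (ds ++ [b]) ++ e = ds ++ b :: e := by simp
        rw [this, pv_erase_max ds e b (List.pairwise_append.mp hsd).1 hdsb]
        simp
      simp only [elevStep, if_neg hne, if_neg (show ¬((-1 : Int) = 1) by norm_num), hcand,
                 if_neg (show ¬(ds ++ [b] = []) by simp), hmax, hrem]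
      have hsub : List.Sublist (ds ++ e) ((ds ++ [b]) ++ e) := by
        exact (List.append_sublist_append_right e).mpr (List.sublist_append_left ds [b])
      have hrec := ih f b (hs.sublist hsub) hdsb (fun x hx => lt_of_le_of_lt hbpos (he x hx)) (by simp at hfuel ⊢; omega)
      simp [hrec]

lemma pv_filter_split (s : List Int) (p : Int → Bool)
    (hmono : ∀ x y : Int, x ≤ y → p y = true → p x = true)
    (hs : s.Pairwise (· ≤ ·)) :
    s.filter p ++ s.filter (fun r => !(p r)) = s := by
  induction s with
  | nil => rfl
  | cons a t ih =>
    rcases List.pairwise_cons.mp hs with ⟨ha, ht⟩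
    by_cases hpa : p a = true
    · rw [List.filter_cons_of_pos hpa, List.filter_cons_of_neg (by simp [hpa]), List.cons_append, ih ht]
    · have hall : ∀ y ∈ t, p y = false := by
        intro y hy
        by_contra hc
        exact hpa (hmono a y (ha y hy) (by simpa using hc))
      rw [List.filter_cons_of_neg (by simp [hpa]), List.filter_cons_of_pos (by simp [hpa]),
          List.filter_eq_nil_iff.mpr (by intro y hy; simp [hall y hy]),
          List.filter_eq_self.mpr (by intro y hy; simp [hall y hy])]
      simp

lemma pv_main (requests : List Int) (current_pos : Int) (direction : Int)
    (hpre : direction = 1 ∨ direction = -1 ∨ ∀ r ∈ requests, r ≤ current_pos) :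
    elevator_disk_scheduling requests current_pos direction = elevator_disk_scheduling_alt requests current_pos direction := by
  simp only [elevator_disk_scheduling, elevator_disk_scheduling_alt]
  set s := PySem.List.sorted requests (fun x => x) with hsdef
  have hs : s.Pairwise (· ≤ ·) := PySem.List.sorted_pairwise requests (fun x => x)
  by_cases h1 : direction = 1
  · subst h1
    rw [if_pos rfl]
    have hsplit : s.filter (fun r => decide (r < current_pos)) ++ s.filter (fun r => decide (current_pos ≤ r)) = s := by
      have hcongr : s.filter (fun r => decide (current_pos ≤ r)) = s.filter (fun r => !(decide (r < current_pos))) := by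
        refine List.filter_congr ?_
        intro x _
        by_cases h : x < current_pos
        · simp [h, not_le.mpr h]
        · simp [h, not_lt.mp h]
      rw [hcongr]
      exact pv_filter_split s (fun r => decide (r < current_pos)) (fun x y hxy hy => by simp at hy ⊢; omega) hs
    conv_lhs => rw [← hsplit]
    rw [pv_up _ _ _ _ (by rw [hsplit]; exact hs)
        (by intro x hx; simpa using (List.mem_filter.mp hx).2)
        (by intro x hx; simpa using (List.mem_filter.mp hx).2)
        (by rw [hsplit]; omega)]
  · rw [if_neg h1]
    by_cases h2 : direction = -1
    · subst h2
      have hsplit : s.filter (fun r => decide (r ≤ current_pos)) ++ s.filter (fun r => decide (current_pos < r)) = s := by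
        have hcongr : s.filter (fun r => decide (current_pos < r)) = s.filter (fun r => !(decide (r ≤ current_pos))) := by
          refine List.filter_congr ?_
          intro x _
          by_cases h : x ≤ current_pos
          · simp [h, not_lt.mpr h]
          · simp [h, not_le.mp h]
        rw [hcongr]
        exact pv_filter_split s (fun r => decide (r ≤ current_pos)) (fun x y hxy hy => by simp at hy ⊢; omega) hs
      conv_lhs => rw [← hsplit]
      rw [pv_down _ _ _ _ (by rw [hsplit]; exact hs)
          (by intro x hx; simpa using (List.mem_filter.mp hx).2)
          (by intro x hx; simpa using (List.mem_filter.mp hx).2)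
          (by rw [hsplit]; omega)]
    · have hall : ∀ r ∈ requests, r ≤ current_pos := by
        rcases hpre with h | h | h
        · exact absurd h h1
        · exact absurd h h2
        · exact h
      have halls : ∀ x ∈ s, x ≤ current_pos := by
        intro x hx
        exact hall x ((PySem.List.mem_sorted requests (fun x => x) false x).mp hx)
      rw [pv_down_only _ _ _ _ hs halls h1 (by omega)]
      rw [List.filter_eq_self.mpr (by intro y hy; simpa using halls y hy),
          List.filter_eq_nil_iff.mpr (by intro y hy; simpa using not_lt.mpr (halls y hy))]
      simp

-- ===== VERDICT (by name: the statement is the Claim_ definition above) =====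
theorem elevator_disk_scheduling_spec : Claim_equal_elevator_disk_scheduling := by
  intro requests current_pos direction _ hpre
  unfold Pre_elevator_disk_scheduling at hpre
  unfold Spec_elevator_disk_scheduling
  exact pv_main requests current_pos direction hpre
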